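-- pv_equiv track=rewrite | github.com/The-SSky/homework02 | part1/question03.py | question02
-- ===== SOURCE A (Python) =====
-- def question02(string: str):
--     result = -1
--     tmp = -1
--     for c in string:
--         c = ord(c)
--         if c > 47 and c < 58:
--             tmp = c if c > tmp else tmp
--             result = c - 47 if c - 47 > result else result
--         elif c > 64 and c < 91:
--             tmp = c if c > tmp else tmp
--             result = c - 54 if c - 54 > result else result
--         else:
--             result = -1
--             break
--     return result if result != 1 else 2
-- ===== SOURCE B (Python) =====
-- def question02(string: str):
--     alphabet = "0123456789ABCDEFGHIJKLMNOPQRSTUVWXYZ"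
--     chars = set(string)
--     if not chars or not chars.issubset(alphabet):
--         return -1
--     for i, ch in enumerate(reversed(alphabet)):
--         if ch in chars:
--             return max(36 - i, 2)
--     return -1
-- ===== Notes on version B (the rewrite author's own statement) =====
-- stated objective: alternative
-- what changed: Instead of A's running-max scan over the string with an early break, B builds the set of characters once, validates it by a subset test against the 36-char alphabet, and then walks the alphabet from its highest symbol downward returning at the first symbol present in the set (clamped to at least 2).
import Mathlib
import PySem

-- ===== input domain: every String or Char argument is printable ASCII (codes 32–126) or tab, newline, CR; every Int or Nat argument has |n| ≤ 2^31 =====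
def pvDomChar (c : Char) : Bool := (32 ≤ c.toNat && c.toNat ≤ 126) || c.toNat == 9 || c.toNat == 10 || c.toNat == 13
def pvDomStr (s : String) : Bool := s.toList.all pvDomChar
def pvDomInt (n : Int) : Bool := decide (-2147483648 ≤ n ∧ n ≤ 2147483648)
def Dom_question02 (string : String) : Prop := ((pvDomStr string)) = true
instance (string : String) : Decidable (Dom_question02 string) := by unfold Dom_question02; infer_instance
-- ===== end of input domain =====

-- B replaces A's single string scan (running max with early break) by a different
-- algorithm: build the SET of characters once, then walk the fixed 36-char alphabet
-- from its highest symbol downward and answer at the first symbol present; objective: alternative.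


-- ===== PORT A =====
-- the for-loop with early break: state (result, tmp); on an invalid char the loop
-- sets result := -1 and breaks, so the recursion returns -1 there
def question02Loop : List Char → Int → Int → Int
  | [], result, _ => result
  | ch :: cs, result, tmp =>
    let c : Int := (ch.toNat : Int)   -- ord(c)
    if c > 47 ∧ c < 58 then
      question02Loop cs (if c - 47 > result then c - 47 else result) (if c > tmp then c else tmp)
    else if c > 64 ∧ c < 91 then
      question02Loop cs (if c - 54 > result then c - 54 else result) (if c > tmp then c else tmp)
    else
      -1

def question02 (string : String) : Int :=
  let result := question02Loop string.toList (-1) (-1)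
  if result ≠ 1 then result else 2

-- ===== PORT B =====
def q2Alpha : List Char := "0123456789ABCDEFGHIJKLMNOPQRSTUVWXYZ".toList

-- the for-loop over enumerate(reversed(alphabet)): the first alphabet symbol (from
-- the top) present in the character set decides the answer
def q2Scan (chars : PySem.Set Char) : List (Int × Char) → Int
  | [] => -1
  | (i, ch) :: rest =>
    if PySem.Set.contains chars ch then max (36 - i) 2 else q2Scan chars rest

def question02_alt (string : String) : Int :=
  let chars : PySem.Set Char := PySem.Set.ofList string.toList
  if chars.isEmpty || !(PySem.Set.issubset chars q2Alpha) then -1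
  else q2Scan chars (PySem.List.enumerate q2Alpha.reverse 0)

-- ===== PRECONDITION & SPEC =====
def Spec_question02 (string : String) (out : Int) : Prop := out = question02_alt string
instance (string : String) (out : Int) : Decidable (Spec_question02 string out) := by unfold Spec_question02; infer_instance

-- ===== CLAIM (what is proved, stated in full; the proofs are below) =====
def Claim_equal_question02 : Prop := ∀ (string : String), Dom_question02 string → Spec_question02 string (question02 string)

-- ===== LEMMAS AND PROOFS =====

-- '0' <= c <= '9' or 'A' <= c <= 'Z' (A's branch test, on the code point)
def q2Ok (c : Char) : Bool := (48 ≤ c.toNat && c.toNat ≤ 57) || (65 ≤ c.toNat && c.toNat ≤ 90)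

-- the value A's running max tracks for a valid char: int(c, 36) + 1
def q2Val (c : Char) : Int :=
  (if 48 ≤ c.toNat && c.toNat ≤ 57 then (c.toNat : Int) - 48 else (c.toNat : Int) - 55) + 1

theorem question02Loop_eq (cs : List Char) : ∀ (r t : Int),
    question02Loop cs r t =
      if cs.all q2Ok then cs.foldl (fun a x => max a (q2Val x)) r else -1 := by
  induction cs with
  | nil => intro r t; simp [question02Loop]
  | cons c cs ih =>
    intro r t
    simp only [question02Loop, List.all_cons, List.foldl_cons]
    by_cases hd : (47 : Int) < (c.toNat : Int) ∧ (c.toNat : Int) < 58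
    · have hok : q2Ok c = true := by simp [q2Ok]; omega
      rw [if_pos hd, ih]
      have hv : (if (c.toNat : Int) - 47 > r then (c.toNat : Int) - 47 else r)
          = max r (q2Val c) := by
        have : (48 ≤ c.toNat && c.toNat ≤ 57) = true := by simp; omega
        simp [q2Val, this]; omega
      rw [hv, hok]; simp
    · by_cases hl : (64 : Int) < (c.toNat : Int) ∧ (c.toNat : Int) < 91
      · have hok : q2Ok c = true := by simp [q2Ok]; omega
        rw [if_neg hd, if_pos hl, ih]
        have hv : (if (c.toNat : Int) - 54 > r then (c.toNat : Int) - 54 else r)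
            = max r (q2Val c) := by
          have : (48 ≤ c.toNat && c.toNat ≤ 57) = false := by simp; omega
          simp [q2Val, this]; omega
        rw [hv, hok]; simp
      · have hok : q2Ok c = false := by simp [q2Ok]; omega
        rw [if_neg hd, if_neg hl, hok]; simp

theorem q2Val_ge_one (c : Char) (h : q2Ok c = true) : 1 ≤ q2Val c := by
  simp [q2Ok] at h; simp [q2Val]; split <;> omega

theorem char_toNat_inj {a c : Char} (h : a.toNat = c.toNat) : a = c :=
  Char.ext (UInt32.toNat_inj.mp h)

theorem q2Ok_iff_mem (c : Char) : q2Ok c = true ↔ c ∈ q2Alpha := by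
  constructor
  · intro h
    simp only [q2Ok, Bool.or_eq_true, Bool.and_eq_true, decide_eq_true_eq] at h
    have hmap : c ∈ q2Alpha ↔ c.toNat ∈ q2Alpha.map Char.toNat := by
      rw [List.mem_map]
      constructor
      · intro hc; exact ⟨c, hc, rfl⟩
      · rintro ⟨a, ha, hna⟩
        rwa [char_toNat_inj hna] at ha
    rw [hmap]
    have hlist : q2Alpha.map Char.toNat = [48,49,50,51,52,53,54,55,56,57,65,66,67,68,69,70,71,72,73,74,75,76,77,78,79,80,81,82,83,84,85,86,87,88,89,90] := by decide
    rw [hlist]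
    rcases h with ⟨h1,h2⟩|⟨h1,h2⟩ <;>
    · set n := c.toNat
      interval_cases n <;> decide
  · intro h
    have hall : q2Alpha.all q2Ok = true := by decide
    exact (List.all_eq_true.mp hall) c h

-- the descending alphabet walk returns the 1->2-clamped maximum per-char value:
-- the list L is strictly decreasing in value and covers every char of l, so the
-- first hit is the maximum
theorem q2Scan_spec (l : List Char) (hne : l ≠ []) : ∀ L : List (Int × Char),
    (∀ c ∈ l, c ∈ L.map Prod.snd) →
    L.Pairwise (fun p q => q2Val q.2 < q2Val p.2) →
    (∀ p ∈ L, q2Val p.2 = 36 - p.1) →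
    (∀ c ∈ l, q2Ok c = true) →
    q2Scan (PySem.Set.ofList l) L
      = max (l.foldl (fun a x => max a (q2Val x)) (-1)) 2 := by
  intro L
  induction L with
  | nil =>
    intro hcov _ _ _
    obtain ⟨c, hc⟩ := List.exists_mem_of_ne_nil l hne
    exact absurd (hcov c hc) (by simp)
  | cons p L ih =>
    obtain ⟨i, ch⟩ := p
    intro hcov hpw hval hok
    simp only [q2Scan]
    by_cases hmem : ch ∈ l
    · rw [if_pos (by rw [PySem.Set.contains_iff, PySem.Set.mem_ofList]; exact hmem)]
      -- every char of l has value ≤ q2Val ch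
      have hub : ∀ c ∈ l, q2Val c ≤ q2Val ch := by
        intro c hc
        rcases List.mem_map.mp (hcov c hc) with ⟨q, hq, hqc⟩
        rcases List.mem_cons.mp hq with rfl | hq'
        · simp at hqc; rw [hqc]
        · have := (List.pairwise_cons.mp hpw).1 q hq'
          rw [hqc] at this; exact le_of_lt this
      set M := l.foldl (fun a x => max a (q2Val x)) (-1) with hM
      have hfold : M = (l.map q2Val).foldl max (-1) := by
        rw [List.foldl_map]
      have hge : q2Val ch ≤ M := by
        have := (PySem.List.le_foldl_max (l.map q2Val) (-1)).2 (q2Val ch)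
          (List.mem_map.mpr ⟨ch, hmem, rfl⟩)
        rw [hfold]; exact this
      have hle : M ≤ q2Val ch := by
        rcases PySem.List.foldl_max_mem (l.map q2Val) (-1) with h | h
        · rw [hfold, h]
          have := q2Val_ge_one ch (hok ch hmem); omega
        · rcases List.mem_map.mp h with ⟨c, hc, hvc⟩
          rw [hfold, ← hvc]
          exact hub c hc
      have : M = q2Val ch := le_antisymm hle hge
      rw [this, hval (i, ch) (List.mem_cons_self)]
    · rw [if_neg (by rw [PySem.Set.contains_iff, PySem.Set.mem_ofList]; simpa using hmem)]
      apply ih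
      · intro c hc
        rcases List.mem_map.mp (hcov c hc) with ⟨q, hq, hqc⟩
        rcases List.mem_cons.mp hq with rfl | hq'
        · simp at hqc; exact absurd (hqc ▸ hc) hmem
        · exact List.mem_map.mpr ⟨q, hq', hqc⟩
      · exact (List.pairwise_cons.mp hpw).2
      · intro q hq; exact hval q (List.mem_cons_of_mem _ hq)
      · exact hok

-- ===== VERDICT (by name: the statement is the Claim_ definition above) =====
theorem question02_spec : Claim_equal_question02 := by
  intro s _
  unfold Spec_question02 question02 question02_alt
  rw [question02Loop_eq]
  cases h : s.toList with
  | nil => simp [PySem.Set.ofList]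
  | cons c cs =>
    by_cases hall : (c :: cs).all q2Ok
    · rw [if_pos hall]
      have hok : ∀ x ∈ c :: cs, q2Ok x = true := List.all_eq_true.mp hall
      have hne : (PySem.Set.ofList (c :: cs) : List Char).isEmpty = false := by
        have hcmem : c ∈ PySem.Set.ofList (c :: cs) := by
          rw [PySem.Set.mem_ofList]; simp
        cases hh : (PySem.Set.ofList (c :: cs) : List Char) with
        | nil => rw [hh] at hcmem; simp at hcmem
        | cons a t => simp
      have hsub : PySem.Set.issubset (PySem.Set.ofList (c :: cs)) q2Alpha = true := by
        rw [PySem.Set.issubset_iff]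
        intro x hx
        rw [PySem.Set.mem_ofList] at hx
        exact (q2Ok_iff_mem x).mp (hok x hx)
      simp only [hne, hsub, Bool.not_true, Bool.or_false]
      rw [q2Scan_spec (c :: cs) (by simp) _
        (by intro x hx
            rw [PySem.List.map_snd_enumerate, List.mem_reverse]
            exact (q2Ok_iff_mem x).mp (hok x hx))
        (by decide) (by decide) hok]
      set M := (c :: cs).foldl (fun a x => max a (q2Val x)) (-1) with hM
      have h1 : q2Val c ≤ M :=
        (PySem.List.le_foldl_max_int (c :: cs) q2Val (-1)).2 c (by simp)
      have hc1 : 1 ≤ q2Val c := q2Val_ge_one c (hok c (by simp))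
      by_cases hM1 : M = 1
      · rw [hM1]; norm_num
      · rw [if_pos hM1, max_eq_left (by omega)]
        simp
    · rw [if_neg hall]
      simp only [List.all_eq_true, not_forall] at hall
      obtain ⟨x, hx, hxok⟩ := hall
      have hsub : PySem.Set.issubset (PySem.Set.ofList (c :: cs)) q2Alpha = false := by
        rw [Bool.eq_false_iff]
        intro hs
        exact hxok ((q2Ok_iff_mem x).mpr
          ((PySem.Set.issubset_iff _ _).mp hs x (by rw [PySem.Set.mem_ofList]; exact hx)))
      simp only [hsub, Bool.not_false, Bool.or_true, if_true]
      norm_num
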